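-- pv_equiv track=rewrite | github.com/nadira09/for_3 | 3.7.py | int_text_func
-- ===== SOURCE A (Python) =====
-- def int_func(word):
--     return word.title()
--
-- def int_text_func(text):
--     words=text.split(' ')
--     i=0
--     result=int_func(words[i])
--     i+=1
--
--     while i<len(words):
--         result+=' '+int_func(words[i])
--         i+=1
--     return result
-- ===== SOURCE B (Python) =====
-- def int_text_func(text):
--     # Single character-level pass with a 'previous char was a letter' flag:
--     # a letter starting a word is uppercased, later letters lowercased,
--     # everything else copied verbatim. No split, no .title(), no word loop.
--     out = []
--     prev_alpha = False
--     for c in text: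
--         if c.isalpha():
--             out.append(c.lower() if prev_alpha else c.upper())
--             prev_alpha = True
--         else:
--             out.append(c)
--             prev_alpha = False
--     return ''.join(out)
-- ===== Notes on version B (the rewrite author's own statement) =====
-- stated objective: alternative
-- what changed: Replaces the split-by-space / while-loop / per-word str.title() accumulator with one character-level pass carrying a previous-char-was-a-letter flag (uppercase at word start, lowercase otherwise, copy non-letters), never splitting or calling title().
import Mathlib
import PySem

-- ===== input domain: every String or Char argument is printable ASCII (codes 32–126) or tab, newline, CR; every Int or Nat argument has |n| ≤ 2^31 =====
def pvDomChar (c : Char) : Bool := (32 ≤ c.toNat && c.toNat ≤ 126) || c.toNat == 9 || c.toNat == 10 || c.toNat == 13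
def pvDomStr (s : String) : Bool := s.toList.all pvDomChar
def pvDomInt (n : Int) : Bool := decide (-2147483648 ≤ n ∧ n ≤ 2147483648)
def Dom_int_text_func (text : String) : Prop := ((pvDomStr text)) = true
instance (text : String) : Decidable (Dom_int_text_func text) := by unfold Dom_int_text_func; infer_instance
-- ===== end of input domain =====

-- B replaces A's split-by-space / while-loop / per-word title() accumulator with one
-- character-level pass carrying a 'previous char was a letter' flag (objective: alternative).

-- ===== PORT A =====
-- Hand port of CPython str.title() on the ASCII domain (no PySem primitive exists for it):
-- walk the characters carrying the 'previous character was cased' flag; a cased (here: alpha)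
-- character is lowercased if the flag is set, uppercased otherwise; exact on ASCII, where
-- 'cased' is exactly 'alphabetic'.
def pyTitle : List Char → Bool → List Char
  | [], _ => []
  | c :: rest, prev =>
    (if PySem.Chars.isalpha c then
        (if prev then PySem.Chars.lowerChar c else PySem.Chars.upperChar c)
      else c) :: pyTitle rest (PySem.Chars.isalpha c)

-- word.title(), via the hand port above (strings handled as their character lists throughout)
def int_func (word : List Char) : List Char := pyTitle word false

def int_text_func (text : String) : String :=
  let words := PySem.Chars.splitOn text.toList [' ']   -- text.split(' ')
  match words with
  | [] => ""   -- unreachable: split always returns at least one piece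
  | w :: rest =>
    -- result = int_func(words[0]); while i < len(words): result += ' ' + int_func(words[i])
    String.ofList (rest.foldl (fun r u => r ++ ' ' :: int_func u) (int_func w))

-- ===== PORT B =====
-- Source B's for-loop over characters: state = (output so far, prev_alpha flag)
def int_text_func_alt (text : String) : String :=
  String.ofList
    (text.toList.foldl
      (fun (st : List Char × Bool) c =>
        if PySem.Chars.isalpha c then
          (st.1 ++ [if st.2 then PySem.Chars.lowerChar c else PySem.Chars.upperChar c], true)
        else
          (st.1 ++ [c], false))
      ([], false)).1

-- ===== PRECONDITION & SPEC =====
def Spec_int_text_func (text : String) (out : String) : Prop := out = int_text_func_alt text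
instance (text : String) (out : String) : Decidable (Spec_int_text_func text out) := by unfold Spec_int_text_func; infer_instance

-- ===== CLAIM =====
def Claim_equal_int_text_func : Prop := ∀ (text : String), Dom_int_text_func text → Spec_int_text_func text (int_text_func text)

-- ===== LEMMAS AND PROOFS =====

-- Clean structural recursion equivalent to splitOn on the single-char separator ' ':
-- returns (first word, remaining words).
def split1 : List Char → List Char × List (List Char)
  | [] => ([], [])
  | c :: rest =>
    if c = ' ' then ([], (split1 rest).1 :: (split1 rest).2)
    else (c :: (split1 rest).1, (split1 rest).2)

theorem splitOn_go_space (fuel : Nat) (l cur : List Char) (acc : List (List Char))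
    (h : l.length < fuel) :
    PySem.Chars.splitOn.go [' '] fuel l cur acc =
      acc.reverse ++ (cur.reverse ++ (split1 l).1) :: (split1 l).2 := by
  induction fuel generalizing l cur acc with
  | zero => omega
  | succ n ih =>
    cases l with
    | nil => simp [PySem.Chars.splitOn.go, split1]
    | cons c rest =>
      by_cases hc : c = ' '
      · subst hc
        rw [show PySem.Chars.splitOn.go [' '] (n+1) (' ' :: rest) cur acc =
              PySem.Chars.splitOn.go [' '] n (List.drop 1 (' ' :: rest)) [] (cur.reverse :: acc) by
            simp [PySem.Chars.splitOn.go, List.isPrefixOf]]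
        simp only [List.drop_succ_cons, List.drop_zero]
        rw [ih rest [] (cur.reverse :: acc) (by simpa using Nat.lt_of_succ_lt_succ h)]
        simp [split1]
      · have hstep : PySem.Chars.splitOn.go [' '] (n+1) (c :: rest) cur acc =
            PySem.Chars.splitOn.go [' '] n rest (c :: cur) acc := by
          simp only [PySem.Chars.splitOn.go, List.isPrefixOf]
          rw [if_neg]
          simp only [Bool.and_true, beq_iff_eq]
          exact fun h' => hc h'.symm
        rw [hstep]
        rw [ih rest (c :: cur) acc (by simpa using Nat.lt_of_succ_lt_succ h)]
        simp [split1, hc]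

theorem splitOn_space (cs : List Char) :
    PySem.Chars.splitOn cs [' '] = (split1 cs).1 :: (split1 cs).2 := by
  unfold PySem.Chars.splitOn
  rw [splitOn_go_space (cs.length + 1) cs [] [] (Nat.lt_succ_self _)]
  simp

theorem split1_cons_space (rest : List Char) :
    split1 (' ' :: rest) = ([], (split1 rest).1 :: (split1 rest).2) := by
  simp [split1]

theorem split1_cons_ne (c : Char) (rest : List Char) (hc : c ≠ ' ') :
    split1 (c :: rest) = (c :: (split1 rest).1, (split1 rest).2) := by
  simp [split1, hc]

-- A-side accumulator only ever grows on the right, so a prefix factors out of the fold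
theorem foldl_append_left (ws : List (List Char)) (a x : List Char) :
    ws.foldl (fun r u => r ++ ' ' :: int_func u) (a ++ x) =
      a ++ ws.foldl (fun r u => r ++ ' ' :: int_func u) x := by
  induction ws generalizing x with
  | nil => rfl
  | cons w ws ih =>
    simp only [List.foldl_cons, List.append_assoc]
    exact ih (x ++ ' ' :: int_func w)

-- core fact about A: titling each space-separated word from a fresh flag and rejoining with
-- ' ' equals one pyTitle pass over the whole string (a space is not cased, so it is copied
-- unchanged and resets the flag to false — exactly a fresh word start).
theorem title_split (cs : List Char) (b : Bool) :
    ((split1 cs).2).foldl (fun r u => r ++ ' ' :: int_func u) (pyTitle (split1 cs).1 b) =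
      pyTitle cs b := by
  induction cs generalizing b with
  | nil => rfl
  | cons c rest ih =>
    by_cases hc : c = ' '
    · subst hc
      rw [split1_cons_space]
      have h1 : List.foldl (fun r u => r ++ ' ' :: int_func u) (pyTitle ([] : List Char) b)
            ((split1 rest).1 :: (split1 rest).2) =
          List.foldl (fun r u => r ++ ' ' :: int_func u)
            ([' '] ++ pyTitle (split1 rest).1 false) (split1 rest).2 := rfl
      rw [h1, foldl_append_left, ih false]
      have halpha : PySem.Chars.isalpha ' ' = false := by decide
      simp [pyTitle, halpha]
    · rw [split1_cons_ne c rest hc]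
      have h1 : pyTitle (c :: (split1 rest).1) b =
          [(if PySem.Chars.isalpha c then
              (if b then PySem.Chars.lowerChar c else PySem.Chars.upperChar c)
            else c)] ++ pyTitle (split1 rest).1 (PySem.Chars.isalpha c) := rfl
      rw [h1, foldl_append_left, ih (PySem.Chars.isalpha c)]
      rfl

-- core fact about B: the char-level fold from state (acc, b) appends pyTitle cs b to acc.
theorem alt_fold_eq_title (cs : List Char) (acc : List Char) (b : Bool) :
    (cs.foldl
      (fun (st : List Char × Bool) c =>
        if PySem.Chars.isalpha c then
          (st.1 ++ [if st.2 then PySem.Chars.lowerChar c else PySem.Chars.upperChar c], true)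
        else
          (st.1 ++ [c], false))
      (acc, b)).1 = acc ++ pyTitle cs b := by
  induction cs generalizing acc b with
  | nil => simp [pyTitle]
  | cons c rest ih =>
    by_cases h : PySem.Chars.isalpha c
    · simp only [List.foldl_cons, h, if_true, ih, pyTitle, List.append_assoc]
      rfl
    · simp only [List.foldl_cons, h, if_false, ih, pyTitle, List.append_assoc]
      simp [h]

-- ===== VERDICT =====
theorem int_text_func_spec : Claim_equal_int_text_func := by
  intro text _
  show int_text_func text = int_text_func_alt text
  unfold int_text_func int_text_func_alt
  rw [splitOn_space]
  simp only []
  rw [show int_func (split1 text.toList).1 = pyTitle (split1 text.toList).1 false from rfl,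
      title_split, alt_fold_eq_title]
  simp
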